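-- pv_equiv track=rewrite | github.com/rshest/advent2023 | 03.py | extract_nums
-- ===== SOURCE A (Python) =====
-- def is_symbol(c):
--     return c is not None and not c.isdigit() and c != '.'
--
-- OFFSETS = [
--     [-1, -1], [0, -1], [1, -1],
--     [-1, 0], [1, 0],
--     [-1, 1], [0, 1], [1, 1]]
--
-- def get_at(lines, x, y):
--     h = len(lines)
--     w = len(lines[0])
--     if x >= 0 and x < w and y >= 0 and y < h:
--         return lines[y][x]
--     return None
--
-- def has_symbol_neighbor(lines, i, j):
--     h = len(lines)
--     w = len(lines[0])
--     for dx, dy in OFFSETS: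
--         x = i + dx
--         y = j + dy
--         if is_symbol(get_at(lines, x, y)):
--             return True
--     return False
--
-- def get_gear_neighbors(lines, i, j):
--     res = set()
--     h = len(lines)
--     w = len(lines[0])
--     for dx, dy in OFFSETS:
--         x = i + dx
--         y = j + dy
--         c = get_at(lines, x, y)
--         if c == '*':
--             res.add((x, y))
--     return res
--
-- def extract_nums(lines):
--     h = len(lines)
--     w = len(lines[0])
--
--     is_part = False
--     n = 0
--     num_digits = 0
--     nums = []
--     gears = set()
--     for j in range(h):
--         for i in range(w):
--             c = lines[j][i]
--
--             if c.isdigit():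
--                 n = n * 10 + int(c)
--                 num_digits += 1
--                 is_part = is_part or has_symbol_neighbor(lines, i, j)
--                 g = get_gear_neighbors(lines, i, j)
--                 if g is not None:
--                     gears = gears.union(g)
--
--             if (not c.isdigit() or i == w - 1) and num_digits > 0:
--                 nums.append((n, is_part, gears))
--                 is_part = False
--                 n = 0
--                 num_digits = 0
--                 gears = set()
--     return nums
-- ===== SOURCE B (Python) =====
-- def extract_nums(lines):
--     w = len(lines[0])
--     grid = [line[:w] for line in lines]
--     h = len(grid)
--     offs = [(-1, -1), (0, -1), (1, -1), (-1, 0), (1, 0), (-1, 1), (0, 1), (1, 1)]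
--     res = []
--     for j, row in enumerate(grid):
--         i = 0
--         while i < w:
--             if not ('0' <= row[i] <= '9'):
--                 i += 1
--                 continue
--             s = i
--             while i < w and '0' <= row[i] <= '9':
--                 i += 1
--             n = 0
--             for c in row[s:i]:
--                 n = 10 * n + (ord(c) - 48)
--             box = [(x + dx, j + dy) for x in range(s, i) for dx, dy in offs]
--             seen = [((x, y), grid[y][x]) for x, y in box if 0 <= x < w and 0 <= y < h]
--             is_part = any(c != '.' and not ('0' <= c <= '9') for _, c in seen)
--             gears = set(p for p, c in seen if c == '*')
--             res.append((n, is_part, gears))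
--     return res
-- ===== Notes on version B (the rewrite author's own statement) =====
-- stated objective: alternative
-- what changed: A is a grid-wide character state machine threading is_part/n/num_digits/gears accumulators across every cell; B instead extracts each row's maximal digit runs with a scanning loop and computes each run's value, part flag and gear set in one local pass over the run's neighbour cells.
import Mathlib
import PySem

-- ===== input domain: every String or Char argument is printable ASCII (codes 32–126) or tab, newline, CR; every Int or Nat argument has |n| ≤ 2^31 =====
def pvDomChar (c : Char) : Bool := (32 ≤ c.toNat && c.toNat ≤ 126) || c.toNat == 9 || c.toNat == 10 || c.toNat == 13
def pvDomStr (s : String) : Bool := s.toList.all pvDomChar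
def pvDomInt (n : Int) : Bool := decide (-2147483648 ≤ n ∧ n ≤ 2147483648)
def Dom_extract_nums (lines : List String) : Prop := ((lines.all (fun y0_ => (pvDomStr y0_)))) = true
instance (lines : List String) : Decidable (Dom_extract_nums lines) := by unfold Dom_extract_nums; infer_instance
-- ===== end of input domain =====

-- B replaces A's grid-wide character state machine by per-row extraction of maximal digit
-- runs, each run's fields computed in one local pass over its neighbour box (objective: alternative).

-- ===== PORT A =====
-- Python strings are handled as List Char throughout (PySem.Chars level).

def pvIsdigitA (c : Char) : Bool := PySem.Chars.isdigit c   -- c.isdigit(), exact on the ASCII domain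

def is_symbol (c : Option Char) : Bool :=
  match c with
  | none => false
  | some ch => !(pvIsdigitA ch) && !(ch == '.')

def OFFSETS : List (Int × Int) :=
  [(-1, -1), (0, -1), (1, -1), (-1, 0), (1, 0), (-1, 1), (0, 1), (1, 1)]

def get_at (g : List (List Char)) (x y : Int) : Option Char :=
  let h : Int := PySem.List.len g
  let w : Int := PySem.List.len (PySem.List.pyGetD g 0 [])
  if 0 ≤ x ∧ x < w ∧ 0 ≤ y ∧ y < h then
    -- lines[y][x]; under Pre_ the index is in range, so pyGetD is exact
    some (PySem.List.pyGetD (PySem.List.pyGetD g y []) x ' ')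
  else none

def has_symbol_neighbor (g : List (List Char)) (i j : Int) : Bool :=
  -- the for-loop with early 'return True' is an 'any' over OFFSETS
  OFFSETS.any (fun d => is_symbol (get_at g (i + d.1) (j + d.2)))

def get_gear_neighbors (g : List (List Char)) (i j : Int) : PySem.Set (Int × Int) :=
  OFFSETS.foldl (fun res d =>
    let x := i + d.1
    let y := j + d.2
    let c := get_at g x y
    if c == some '*' then PySem.Set.add res (x, y) else res) PySem.Set.empty

-- state: (is_part, n, num_digits, nums, gears)
abbrev PvStA := Bool × Int × Int × List (Int × Bool × List (Int × Int)) × PySem.Set (Int × Int)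

-- body of A's inner loop over i (one column of row j); int(c) ported as c.toNat - 48,
-- exact because it is only evaluated on a digit character
def pvStepA (g : List (List Char)) (w : Int) (j : Int) (st : PvStA) (i : Int) : PvStA :=
  let c : Char := PySem.List.pyGetD (PySem.List.pyGetD g j []) i ' '
  let st1 : PvStA :=
    if pvIsdigitA c then
      (st.1 || has_symbol_neighbor g i j,
       st.2.1 * 10 + ((c.toNat : Int) - 48),
       st.2.2.1 + 1,
       st.2.2.2.1,
       PySem.Set.union st.2.2.2.2 (get_gear_neighbors g i j))   -- 'g is not None' is always true
    else st
  if (!(pvIsdigitA c) || i == w - 1) && st1.2.2.1 > 0 then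
    (false, 0, 0, st1.2.2.2.1 ++ [(st1.2.1, st1.1, st1.2.2.2.2)], PySem.Set.empty)
  else st1

def extract_nums (lines : List String) : List (Int × Bool × (List (Int × Int))) :=
  let g := lines.map String.toList
  let h : Int := PySem.List.len g
  let w : Int := PySem.List.len (PySem.List.pyGetD g 0 [])
  let fin := (PySem.List.pyRange 0 h 1).foldl (fun st j =>
      (PySem.List.pyRange 0 w 1).foldl (pvStepA g w j) st)
    ((false, 0, 0, [], PySem.Set.empty) : PvStA)
  fin.2.2.2.1

-- ===== PORT B =====

def pvIsdigitB (c : Char) : Bool := decide ('0' ≤ c) && decide (c ≤ '9')   -- '0' <= c <= '9'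

-- the scanning while-loop of B: maximal digit runs (s, e) of row, starting at index i
def pvRunsB (cs : List Char) (i : Nat) : List (Nat × Nat) :=
  match cs with
  | [] => []
  | c :: rest =>
    if pvIsdigitB c then
      let k := (rest.takeWhile pvIsdigitB).length   -- the inner while advancing over digits
      (i, i + (k + 1)) :: pvRunsB (rest.drop k) (i + (k + 1))
    else pvRunsB rest (i + 1)
termination_by cs.length
decreasing_by
  all_goals (simp [List.length_drop]; try omega)

def pvOffsB : List (Int × Int) :=
  [(-1, -1), (0, -1), (1, -1), (-1, 0), (1, 0), (-1, 1), (0, 1), (1, 1)]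

def pvRunTupleB (grid : List (List Char)) (w h : Nat) (j : Int) (row : List Char)
    (s e : Nat) : Int × Bool × List (Int × Int) :=
  let n : Int := ((row.drop s).take (e - s)).foldl (fun n c => 10 * n + ((c.toNat : Int) - 48)) 0
  let box : List (Int × Int) :=
    (PySem.List.pyRange (s : Int) (e : Int) 1).flatMap
      (fun x => pvOffsB.map (fun d => (x + d.1, j + d.2)))
  let seen : List ((Int × Int) × Char) :=
    box.filterMap (fun p =>
      if 0 ≤ p.1 ∧ p.1 < (w : Int) ∧ 0 ≤ p.2 ∧ p.2 < (h : Int) then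
        some (p, (grid.getD p.2.toNat []).getD p.1.toNat ' ')
      else none)
  let is_part := seen.any (fun q => !(q.2 == '.') && !(pvIsdigitB q.2))
  let gears : PySem.Set (Int × Int) :=
    PySem.Set.ofList ((seen.filter (fun q => q.2 == '*')).map (·.1))
  (n, is_part, gears)

def extract_nums_alt (lines : List String) : List (Int × Bool × (List (Int × Int))) :=
  let w : Nat := (lines.headD "").toList.length
  let grid := lines.map (fun s => s.toList.take w)
  let h : Nat := grid.length
  (PySem.List.enumerate grid).flatMap (fun jr =>
    (pvRunsB jr.2 0).map (fun se => pvRunTupleB grid w h jr.1 jr.2 se.1 se.2))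

-- ===== PRECONDITION & SPEC =====
-- Pre_ excludes exactly the inputs where A raises (IndexError): the empty list
-- (len(lines[0])) and grids where some row is shorter than the first row.
def Pre_extract_nums (lines : List String) : Prop :=
  lines ≠ [] ∧ ∀ s ∈ lines, (lines.headD "").toList.length ≤ s.toList.length
instance (lines : List String) : Decidable (Pre_extract_nums lines) := by
  unfold Pre_extract_nums; infer_instance

def pvWitness_extract_nums : List String := ["467..114..", "...*......"]

def Spec_extract_nums (lines : List String) (out : List (Int × Bool × (List (Int × Int)))) : Prop := out = extract_nums_alt lines
instance (lines : List String) (out : List (Int × Bool × (List (Int × Int)))) : Decidable (Spec_extract_nums lines out) := by unfold Spec_extract_nums; infer_instance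

-- ===== CLAIM (what is proved, stated in full; the proofs are below) =====
def Claim_equal_extract_nums : Prop := ∀ (lines : List String), Dom_extract_nums lines → Pre_extract_nums lines → Spec_extract_nums lines (extract_nums lines)

-- ===== LEMMAS AND PROOFS =====

-- the truncated rectangular grid B works on, and its rows
def pvGrid (g : List (List Char)) (W : Nat) : List (List Char) := g.map (fun r => r.take W)

def pvRow (g : List (List Char)) (W : Nat) (j : Nat) : List Char := (pvGrid g W).getD j []

-- B's per-run tuple, relative to the truncated grid
def pvTuple (g : List (List Char)) (W : Nat) (j : Nat) (s e : Nat) :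
    Int × Bool × List (Int × Int) :=
  pvRunTupleB (pvGrid g W) W g.length (j : Int) (pvRow g W j) s e

-- A's loop state mid-run: run started at s, columns [s, i) consumed
def pvSt (g : List (List Char)) (W : Nat) (j : Nat) (s i : Nat)
    (nums : List (Int × Bool × List (Int × Int))) : PvStA :=
  ((pvTuple g W j s i).2.1, (pvTuple g W j s i).1, ((i : Int) - (s : Int)), nums,
   (pvTuple g W j s i).2.2)

-- end of the digit run starting at i
def pvEnd (g : List (List Char)) (W : Nat) (j : Nat) (i : Nat) : Nat :=
  i + (((pvRow g W j).drop i).takeWhile pvIsdigitB).length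

-- B's output for the tail of row j starting at column i
def pvOut (g : List (List Char)) (W : Nat) (j : Nat) (i : Nat) :
    List (Int × Bool × List (Int × Int)) :=
  (pvRunsB ((pvRow g W j).drop i) i).map (fun se => pvTuple g W j se.1 se.2)

-- what A appends while finishing the tail of row j from state pvSt s i
def pvK (g : List (List Char)) (W : Nat) (j : Nat) (s i : Nat) :
    List (Int × Bool × List (Int × Int)) :=
  if s < i ∨ (i < W ∧ pvIsdigitB ((pvRow g W j).getD i ' ') = true) then
    pvTuple g W j s (pvEnd g W j i) :: pvOut g W j (pvEnd g W j i)
  else pvOut g W j i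

-- total closed form of get_at
def pvAt (g : List (List Char)) (W : Nat) (x y : Int) : Option Char :=
  if 0 ≤ x ∧ x < (W : Int) ∧ 0 ≤ y ∧ y < (g.length : Int) then
    some ((pvRow g W y.toNat).getD x.toNat ' ')
  else none

-- what B sees from one digit cell x of row j: in-bounds neighbours with their characters
def pvCellSeen (g : List (List Char)) (W : Nat) (j : Int) (x : Int) :
    List ((Int × Int) × Char) :=
  (pvOffsB.map (fun d => (x + d.1, j + d.2))).filterMap (fun p =>
    if 0 ≤ p.1 ∧ p.1 < (W : Int) ∧ 0 ≤ p.2 ∧ p.2 < (g.length : Int) then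
      some (p, ((pvGrid g W).getD p.2.toNat []).getD p.1.toNat ' ')
    else none)

lemma pvIsdigit_eq (c : Char) : pvIsdigitA c = pvIsdigitB c := by
  simp [pvIsdigitA, pvIsdigitB, PySem.Chars.isdigit]

lemma pvRow_eq (g : List (List Char)) (W : Nat) (j : Nat) :
    pvRow g W j = (g.getD j []).take W := by
  rcases Nat.lt_or_ge j g.length with h | h
  · rw [pvRow, pvGrid, List.getD_eq_getElem _ _ (by simpa using h),
      List.getD_eq_getElem _ _ h, List.getElem_map]
  · rw [pvRow, pvGrid, List.getD_eq_default _ _ (by simpa using h),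
      List.getD_eq_default _ _ h]
    simp

lemma pvRow_length (g : List (List Char)) (W : Nat) (hlen : ∀ r ∈ g, W ≤ r.length)
    (j : Nat) (hj : j < g.length) : (pvRow g W j).length = W := by
  rw [pvRow_eq, List.getD_eq_getElem _ _ hj, List.length_take]
  exact Nat.min_eq_left (hlen _ (List.getElem_mem _))

lemma pvChar_eq (g : List (List Char)) (W : Nat) (hlen : ∀ r ∈ g, W ≤ r.length)
    (j : Nat) (hj : j < g.length) (i : Nat) (hi : i < W) :
    PySem.List.pyGetD (PySem.List.pyGetD g (j : Int) []) (i : Int) ' '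
      = (pvRow g W j).getD i ' ' := by
  have hr : pvRow g W j = (g[j]).take W := by
    rw [pvRow_eq, List.getD_eq_getElem _ _ hj]
  have hL : W ≤ g[j].length := hlen _ (List.getElem_mem _)
  have hgj : g.getD j [] = g[j] := List.getD_eq_getElem _ _ (by simpa using hj)
  simp only [PySem.List.pyGetD_natCast]
  rw [hgj, hr, List.getD_eq_getElem _ _ (by omega),
    List.getD_eq_getElem _ _ (by simp; omega)]
  exact (List.getElem_take).symm
lemma pvGet_at_eq (g : List (List Char)) (W : Nat) (hg : g ≠ [])
    (hW : W = (g.headD []).length) (hlen : ∀ r ∈ g, W ≤ r.length) (x y : Int) :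
    get_at g x y = pvAt g W x y := by
  match g, hg with
  | a :: t, _ =>
    have hwv : PySem.List.len (PySem.List.pyGetD (a :: t) 0 []) = (W : Int) := by
      simp [PySem.List.pyGetD_zero, hW]
    unfold get_at pvAt
    simp only [hwv, PySem.List.len_eq]
    split
    · next hcond =>
      obtain ⟨h1, h2, h3, h4⟩ := hcond
      have hy : y.toNat < (a :: t).length := by omega
      have hrowlen : W ≤ ((a :: t)[y.toNat]).length := hlen _ (List.getElem_mem _)
      have hgy : PySem.List.pyGetD (a :: t) y [] = (a :: t)[y.toNat] := by
        rw [PySem.List.pyGetD_eq_getElem _ _ h3 (by exact_mod_cast h4)]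
      have hrx : pvRow (a :: t) W y.toNat = ((a :: t)[y.toNat]).take W := by
        rw [pvRow_eq, List.getD_eq_getElem _ _ hy]
      rw [hgy, hrx,
        PySem.List.pyGetD_eq_getElem _ _ h1 (by omega),
        List.getD_eq_getElem _ _ (by simp [List.length_take]; omega)]
      exact congrArg some (List.getElem_take).symm
    · rfl
lemma pvUpdate_ofList {α : Type} [BEq α] [LawfulBEq α] (s : PySem.Set α) (xs : List α) :
    s.update (PySem.Set.ofList xs) = s.update xs := by
  rw [PySem.Set.update_eq_append_filter, PySem.Set.update_eq_append_filter,
    PySem.Set.ofList_ofList]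

lemma pvTuple_n (g : List (List Char)) (W : Nat) (j : Nat) (s e : Nat) :
    (pvTuple g W j s e).1
      = (((pvRow g W j).drop s).take (e - s)).foldl
          (fun n c => 10 * n + ((c.toNat : Int) - 48)) 0 := by
  simp [pvTuple, pvRunTupleB]

lemma pvTuple_part (g : List (List Char)) (W : Nat) (j : Nat) (s e : Nat) :
    (pvTuple g W j s e).2.1
      = ((PySem.List.pyRange (s : Int) (e : Int)).flatMap
          (fun x => pvCellSeen g W (j : Int) x)).any
            (fun q => !(q.2 == '.') && !(pvIsdigitB q.2)) := by
  simp [pvTuple, pvRunTupleB, pvCellSeen, List.filterMap_flatMap, pvGrid, pvRow]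

lemma pvTuple_gears (g : List (List Char)) (W : Nat) (j : Nat) (s e : Nat) :
    (pvTuple g W j s e).2.2
      = PySem.Set.ofList
          ((((PySem.List.pyRange (s : Int) (e : Int)).flatMap
              (fun x => pvCellSeen g W (j : Int) x)).filter
                (fun q => q.2 == '*')).map (·.1)) := by
  simp [pvTuple, pvRunTupleB, pvCellSeen, List.filterMap_flatMap, pvGrid, pvRow]

lemma pvSt_empty (g : List (List Char)) (W : Nat) (j : Nat) (t : Nat)
    (nums : List (Int × Bool × List (Int × Int))) :
    pvSt g W j t t nums = (false, 0, 0, nums, PySem.Set.empty) := by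
  have h1 := pvTuple_n g W j t t
  have h2 := pvTuple_part g W j t t
  have h3 := pvTuple_gears g W j t t
  rw [PySem.List.pyRange_one_eq_nil (le_refl _)] at h2 h3
  simp at h1 h2 h3
  simp [pvSt, h1, h2, h3, PySem.Set.empty]
lemma pvTuple_n_succ (g : List (List Char)) (W : Nat) (j : Nat) (s i : Nat)
    (hs : s ≤ i) (hi : i < (pvRow g W j).length) :
    (pvTuple g W j s (i + 1)).1
      = 10 * (pvTuple g W j s i).1 + (((pvRow g W j).getD i ' ').toNat - 48 : Int) := by
  set row := pvRow g W j with hrow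
  rw [pvTuple_n, pvTuple_n]
  have h1 : i + 1 - s = (i - s) + 1 := by omega
  have h2 : (row.drop s)[i - s]? = some row[i] := by
    rw [List.getElem?_drop, List.getElem?_eq_getElem (by omega)]
    congr 1; congr 1; omega
  rw [h1, List.take_add_one, h2, List.getD_eq_getElem _ _ hi]
  simp
lemma pvRange_succ (s i : Nat) (hs : s ≤ i) :
    PySem.List.pyRange (s : Int) ((i + 1 : Nat) : Int)
      = PySem.List.pyRange (s : Int) (i : Int) ++ [(i : Int)] := by
  have : ((i + 1 : Nat) : Int) = (i : Int) + 1 := by push_cast; ring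
  rw [this, PySem.List.pyRange_one_succ_right (by exact_mod_cast hs)]

lemma pvTuple_part_succ (g : List (List Char)) (W : Nat) (j : Nat) (s i : Nat)
    (hs : s ≤ i) :
    (pvTuple g W j s (i + 1)).2.1
      = ((pvTuple g W j s i).2.1
          || (pvCellSeen g W (j : Int) (i : Int)).any
              (fun q => !(q.2 == '.') && !(pvIsdigitB q.2))) := by
  rw [pvTuple_part, pvTuple_part, pvRange_succ s i hs, List.flatMap_append,
    List.any_append]
  simp

lemma pvTuple_gears_succ (g : List (List Char)) (W : Nat) (j : Nat) (s i : Nat)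
    (hs : s ≤ i) :
    (pvTuple g W j s (i + 1)).2.2
      = PySem.Set.union (pvTuple g W j s i).2.2
          (PySem.Set.ofList
            (((pvCellSeen g W (j : Int) (i : Int)).filter
                (fun q => q.2 == '*')).map (·.1))) := by
  rw [pvTuple_gears, pvTuple_gears, pvRange_succ s i hs, List.flatMap_append,
    List.filter_append, List.map_append, PySem.Set.ofList_append,
    show ∀ (a b : PySem.Set (Int × Int)), PySem.Set.union a b = a.update b from fun _ _ => rfl,
    pvUpdate_ofList]
  simp
lemma pvHsn_eq (g : List (List Char)) (W : Nat) (hg : g ≠ [])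
    (hW : W = (g.headD []).length) (hlen : ∀ r ∈ g, W ≤ r.length) (x j : Int) :
    has_symbol_neighbor g x j
      = (pvCellSeen g W j x).any (fun q => !(q.2 == '.') && !(pvIsdigitB q.2)) := by
  unfold has_symbol_neighbor pvCellSeen
  rw [List.any_filterMap, List.any_map]
  have hOff : OFFSETS = pvOffsB := rfl
  rw [hOff]
  congr 1
  funext d
  simp only [Function.comp, pvGet_at_eq g W hg hW hlen, pvAt]
  split
  · simp [is_symbol, pvIsdigit_eq, Bool.and_comm, pvRow]
  · simp [is_symbol]
lemma pvGgn_eq (g : List (List Char)) (W : Nat) (hg : g ≠ [])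
    (hW : W = (g.headD []).length) (hlen : ∀ r ∈ g, W ≤ r.length) (x j : Int) :
    get_gear_neighbors g x j
      = PySem.Set.ofList
          (((pvCellSeen g W j x).filter (fun q => q.2 == '*')).map (·.1)) := by
  unfold get_gear_neighbors pvCellSeen
  have hOff : OFFSETS = pvOffsB := rfl
  rw [hOff]
  refine Eq.trans (PySem.List.foldl_if_eq_foldl_filter
    (fun d => get_at g (x + d.1) (j + d.2) == some '*')
    (fun res d => PySem.Set.add res (x + d.1, j + d.2)) pvOffsB PySem.Set.empty) ?_
  rw [← PySem.Set.update_map_eq_foldl_add, PySem.Set.update_empty]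
  rw [List.filter_filterMap, List.map_filterMap, List.filterMap_map]
  have hmf : List.map (fun d => ((x + d.1, j + d.2) : Int × Int))
      (List.filter (fun d => get_at g (x + d.1) (j + d.2) == some '*') pvOffsB)
      = List.filter (fun p => get_at g p.1 p.2 == some '*')
          (pvOffsB.map (fun d => (x + d.1, j + d.2))) := by
    rw [List.filter_map]; rfl
  rw [hmf, ← List.filterMap_map
    (g := fun (p : Int × Int) => Option.map (fun (q : (Int × Int) × Char) => q.1)
      (Option.filter (fun q => q.2 == '*')
      (if 0 ≤ p.1 ∧ p.1 < (W : Int) ∧ 0 ≤ p.2 ∧ p.2 < (g.length : Int) then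
        some (p, ((pvGrid g W).getD p.2.toNat []).getD p.1.toNat ' ') else none))),
    ← List.filterMap_eq_filter]
  congr 1
  apply List.filterMap_congr
  intro p _
  simp only [pvGet_at_eq g W hg hW hlen, pvAt, Option.guard]
  split
  · next hb =>
    by_cases hstar : ((pvRow g W p.2.toNat).getD p.1.toNat ' ') = '*'
    · simp [hstar, Option.filter, pvRow]
    · simp [hstar, Option.filter, pvRow]
  · simp
lemma pvTuple_succ_full (g : List (List Char)) (W : Nat) (hg : g ≠ [])
    (hW : W = (g.headD []).length) (hlen : ∀ r ∈ g, W ≤ r.length)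
    (j : Nat) (hj : j < g.length) (s i : Nat) (hs : s ≤ i) (hi : i < W) :
    pvTuple g W j s (i + 1)
      = ((pvTuple g W j s i).1 * 10 + ((((pvRow g W j).getD i ' ').toNat : Int) - 48),
         (pvTuple g W j s i).2.1 || has_symbol_neighbor g (i : Int) (j : Int),
         PySem.Set.union (pvTuple g W j s i).2.2 (get_gear_neighbors g (i : Int) (j : Int))) := by
  have e1 := pvTuple_n_succ g W j s i hs (by rw [pvRow_length g W hlen j hj]; exact hi)
  have e2 := pvTuple_part_succ g W j s i hs
  have e3 := pvTuple_gears_succ g W j s i hs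
  have hhs := pvHsn_eq g W hg hW hlen (i : Int) (j : Int)
  have hgg := pvGgn_eq g W hg hW hlen (i : Int) (j : Int)
  have heta : pvTuple g W j s (i + 1)
      = ((pvTuple g W j s (i + 1)).1, (pvTuple g W j s (i + 1)).2.1,
         (pvTuple g W j s (i + 1)).2.2) := rfl
  rw [heta, e1, e2, e3, ← hhs, ← hgg, Int.mul_comm]

lemma pvStepA_digit (g : List (List Char)) (W : Nat) (hg : g ≠ [])
    (hW : W = (g.headD []).length) (hlen : ∀ r ∈ g, W ≤ r.length)
    (j : Nat) (hj : j < g.length) (s i : Nat) (hs : s ≤ i) (hi : i < W)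
    (nums : List (Int × Bool × List (Int × Int)))
    (hd : pvIsdigitB ((pvRow g W j).getD i ' ') = true) :
    pvStepA g (W : Int) (j : Int) (pvSt g W j s i nums) (i : Int)
      = if i + 1 = W then
          (false, 0, 0, nums ++ [pvTuple g W j s (i + 1)], PySem.Set.empty)
        else pvSt g W j s (i + 1) nums := by
  have hc := pvChar_eq g W hlen j hj i hi
  have hdA : pvIsdigitA (PySem.List.pyGetD (PySem.List.pyGetD g (j : Int) []) (i : Int) ' ') = true := by
    rw [hc, pvIsdigit_eq]; exact hd
  have hfull := pvTuple_succ_full g W hg hW hlen j hj s i hs hi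
  simp at hc
  by_cases hW1 : i + 1 = W
  · rw [if_pos hW1, hfull]
    have hbeq : ((i : Int) == (W : Int) - 1) = true := by
      simp only [beq_iff_eq]; omega
    simp only [pvStepA, pvSt, hdA, hbeq]
    have hpos : (decide (((i : Int) - (s : Int) + 1) > 0)) = true := by
      simp; omega
    simp [hpos, hs, hc]
  · rw [if_neg hW1]
    have hbeq : ((i : Int) == (W : Int) - 1) = false := by
      simp only [beq_eq_false_iff_ne]; omega
    simp only [pvStepA, pvSt, hdA, hbeq, hfull]
    simp [hc]
    omega
lemma pvStepA_nondigit (g : List (List Char)) (W : Nat) (hg : g ≠ [])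
    (hW : W = (g.headD []).length) (hlen : ∀ r ∈ g, W ≤ r.length)
    (j : Nat) (hj : j < g.length) (s i : Nat) (hs : s ≤ i) (hi : i < W)
    (nums : List (Int × Bool × List (Int × Int)))
    (hd : pvIsdigitB ((pvRow g W j).getD i ' ') = false) :
    pvStepA g (W : Int) (j : Int) (pvSt g W j s i nums) (i : Int)
      = if s < i then
          (false, 0, 0, nums ++ [pvTuple g W j s i], PySem.Set.empty)
        else pvSt g W j s i nums := by
  have hc := pvChar_eq g W hlen j hj i hi
  have hdA : pvIsdigitA (PySem.List.pyGetD (PySem.List.pyGetD g (j : Int) []) (i : Int) ' ') = false := by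
    rw [hc, pvIsdigit_eq]; exact hd
  by_cases hsi : s < i
  · rw [if_pos hsi]
    have hpos : (decide (((i : Int) - (s : Int)) > 0)) = true := by simp; omega
    have heta : pvTuple g W j s i
        = ((pvTuple g W j s i).1, (pvTuple g W j s i).2.1, (pvTuple g W j s i).2.2) := rfl
    simp only [pvStepA, pvSt, hdA, hpos]
    simp [heta.symm]
    omega
  · rw [if_neg hsi]
    have hsi' : s = i := by omega
    have hneg : (decide (((i : Int) - (s : Int)) > 0)) = false := by simp; omega
    simp only [pvStepA, pvSt, hdA, hneg]
    simp
    omega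
lemma pvDrop_cons (g : List (List Char)) (W : Nat) (hlen : ∀ r ∈ g, W ≤ r.length)
    (j : Nat) (hj : j < g.length) (i : Nat) (hi : i < W) :
    (pvRow g W j).drop i = (pvRow g W j).getD i ' ' :: (pvRow g W j).drop (i + 1) := by
  have hL : i < (pvRow g W j).length := by rw [pvRow_length g W hlen j hj]; exact hi
  rw [List.getD_eq_getElem _ _ hL]
  exact List.drop_eq_getElem_cons hL

lemma pvEnd_digit (g : List (List Char)) (W : Nat) (hlen : ∀ r ∈ g, W ≤ r.length)
    (j : Nat) (hj : j < g.length) (i : Nat) (hi : i < W)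
    (hd : pvIsdigitB ((pvRow g W j).getD i ' ') = true) :
    pvEnd g W j i = pvEnd g W j (i + 1) := by
  unfold pvEnd
  rw [pvDrop_cons g W hlen j hj i hi, List.takeWhile_cons, hd]
  simp; omega

lemma pvEnd_head (g : List (List Char)) (W : Nat) (hlen : ∀ r ∈ g, W ≤ r.length)
    (j : Nat) (hj : j < g.length) (i : Nat) (hi : i < W)
    (hd : pvIsdigitB ((pvRow g W j).getD i ' ') = true) :
    pvEnd g W j i
      = i + ((List.takeWhile pvIsdigitB (List.drop (i + 1) (pvRow g W j))).length + 1) := by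
  unfold pvEnd
  rw [pvDrop_cons g W hlen j hj i hi, List.takeWhile_cons, hd]
  simp

lemma pvK_diag (g : List (List Char)) (W : Nat) (hlen : ∀ r ∈ g, W ≤ r.length)
    (j : Nat) (hj : j < g.length) (t : Nat) :
    pvK g W j t t = pvOut g W j t := by
  unfold pvK
  split
  · next hcond =>
    have hd : t < W ∧ pvIsdigitB ((pvRow g W j).getD t ' ') = true := by
      rcases hcond with h | h
      · omega
      · exact h
    obtain ⟨htW, hdig⟩ := hd
    have he := pvEnd_head g W hlen j hj t htW hdig
    have hk : t + ((List.takeWhile pvIsdigitB (List.drop (t + 1) (pvRow g W j))).length + 1)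
        = pvEnd g W j t := he.symm
    have hdd : List.drop (List.takeWhile pvIsdigitB (List.drop (t + 1) (pvRow g W j))).length
          (List.drop (t + 1) (pvRow g W j))
        = List.drop (pvEnd g W j t) (pvRow g W j) := by
      rw [List.drop_drop, he]; congr 1; omega
    conv_rhs => rw [pvOut, pvDrop_cons g W hlen j hj t htW, pvRunsB]
    simp only [hdig, if_true]
    rw [List.map_cons, hk, hdd]
    rfl
  · rfl
lemma pvOut_skip (g : List (List Char)) (W : Nat) (hlen : ∀ r ∈ g, W ≤ r.length)
    (j : Nat) (hj : j < g.length) (i : Nat) (hi : i < W)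
    (hd : pvIsdigitB ((pvRow g W j).getD i ' ') = false) :
    pvOut g W j i = pvOut g W j (i + 1) := by
  unfold pvOut
  rw [pvDrop_cons g W hlen j hj i hi, pvRunsB]
  simp only [hd]
  simp

lemma pvKsucc_digit (g : List (List Char)) (W : Nat) (hlen : ∀ r ∈ g, W ≤ r.length)
    (j : Nat) (hj : j < g.length) (s i : Nat) (hs : s ≤ i) (hi : i < W)
    (hd : pvIsdigitB ((pvRow g W j).getD i ' ') = true) :
    pvK g W j s i = pvK g W j s (i + 1) := by
  have he := pvEnd_digit g W hlen j hj i hi hd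
  unfold pvK
  rw [if_pos (Or.inr ⟨hi, hd⟩), if_pos (Or.inl (by omega)), he]
lemma pvEnd_nondigit (g : List (List Char)) (W : Nat) (hlen : ∀ r ∈ g, W ≤ r.length)
    (j : Nat) (hj : j < g.length) (i : Nat) (hi : i < W)
    (hd : pvIsdigitB ((pvRow g W j).getD i ' ') = false) :
    pvEnd g W j i = i := by
  unfold pvEnd
  rw [pvDrop_cons g W hlen j hj i hi, List.takeWhile_cons, hd]
  simp

lemma pvDrop_W (g : List (List Char)) (W : Nat) (hlen : ∀ r ∈ g, W ≤ r.length)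
    (j : Nat) (hj : j < g.length) : (pvRow g W j).drop W = [] := by
  rw [List.drop_eq_nil_iff, pvRow_length g W hlen j hj]

lemma pvOut_W (g : List (List Char)) (W : Nat) (hlen : ∀ r ∈ g, W ≤ r.length)
    (j : Nat) (hj : j < g.length) : pvOut g W j W = [] := by
  rw [pvOut, pvDrop_W g W hlen j hj, pvRunsB]
  rfl

lemma pvK_at_end (g : List (List Char)) (W : Nat) (hlen : ∀ r ∈ g, W ≤ r.length)
    (j : Nat) (hj : j < g.length) (s : Nat) (hs : s < W) :
    pvK g W j s W = [pvTuple g W j s W] := by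
  have hE : pvEnd g W j W = W := by
    unfold pvEnd
    rw [pvDrop_W g W hlen j hj]
    rfl
  unfold pvK
  rw [if_pos (Or.inl hs), hE, pvOut_W g W hlen j hj]
lemma pv_main (g : List (List Char)) (W : Nat) (hg : g ≠ [])
    (hW : W = (g.headD []).length) (hlen : ∀ r ∈ g, W ≤ r.length)
    (j : Nat) (hj : j < g.length) :
    ∀ (m s i : Nat) (nums : List (Int × Bool × List (Int × Int))),
      s ≤ i → i ≤ W → (s < i → i < W) → W - i ≤ m →
      (PySem.List.pyRange (i : Int) (W : Int)).foldl (pvStepA g (W : Int) (j : Int))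
          (pvSt g W j s i nums)
        = (false, 0, 0, nums ++ pvK g W j s i, PySem.Set.empty) := by
  intro m
  induction m with
  | zero =>
    intro s i nums hs hiW hrun hm
    have h1 : i = W := by omega
    have h2 : s = i := by by_contra h; have := hrun (by omega); omega
    subst h2; rw [h1]
    rw [PySem.List.pyRange_one_eq_nil (le_refl _), List.foldl_nil, pvSt_empty,
      pvK_diag g W hlen j hj, pvOut_W g W hlen j hj, List.append_nil]
  | succ m ih =>
    intro s i nums hs hiW hrun hm
    by_cases hEq : i = W
    · have h2 : s = i := by by_contra h; have := hrun (by omega); omega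
      subst h2; rw [hEq]
      rw [PySem.List.pyRange_one_eq_nil (le_refl _), List.foldl_nil, pvSt_empty,
        pvK_diag g W hlen j hj, pvOut_W g W hlen j hj, List.append_nil]
    · have hi : i < W := by omega
      rw [PySem.List.pyRange_one_cons (by exact_mod_cast hi), List.foldl_cons,
        show ((i : Int) + 1) = ((i + 1 : Nat) : Int) by push_cast; ring]
      by_cases hdig : pvIsdigitB ((pvRow g W j).getD i ' ') = true
      · rw [pvStepA_digit g W hg hW hlen j hj s i hs hi nums hdig]
        by_cases hW1 : i + 1 = W
        · rw [if_pos hW1, hW1, PySem.List.pyRange_one_eq_nil (le_refl _), List.foldl_nil,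
            pvKsucc_digit g W hlen j hj s i hs hi hdig, hW1,
            pvK_at_end g W hlen j hj s (by omega)]
        · rw [if_neg hW1,
            ih s (i + 1) nums (by omega) (by omega) (fun _ => by omega) (by omega),
            pvKsucc_digit g W hlen j hj s i hs hi hdig]
      · have hdig' : pvIsdigitB ((pvRow g W j).getD i ' ') = false := by
          simpa using hdig
        rw [pvStepA_nondigit g W hg hW hlen j hj s i hs hi nums hdig']
        have hKsi : pvK g W j s i
            = if s < i then pvTuple g W j s i :: pvOut g W j (i + 1)
              else pvOut g W j (i + 1) := by
          by_cases hsi : s < i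
          · rw [if_pos hsi]
            unfold pvK
            rw [if_pos (Or.inl hsi), pvEnd_nondigit g W hlen j hj i hi hdig',
              pvOut_skip g W hlen j hj i hi hdig']
          · rw [if_neg hsi]
            have : s = i := by omega
            subst this
            rw [pvK_diag g W hlen j hj, pvOut_skip g W hlen j hj s hi hdig']
        by_cases hsi : s < i
        · rw [if_pos hsi, hKsi, if_pos hsi,
            show ((false, 0, 0, nums ++ [pvTuple g W j s i], PySem.Set.empty) : PvStA)
              = pvSt g W j (i + 1) (i + 1) (nums ++ [pvTuple g W j s i]) from
                (pvSt_empty g W j (i + 1) _).symm,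
            ih (i + 1) (i + 1) _ (le_refl _) (by omega) (fun h => by omega) (by omega),
            pvK_diag g W hlen j hj]
          simp
        · rw [if_neg hsi, hKsi, if_neg hsi]
          have hsEq : s = i := by omega
          subst hsEq
          rw [pvSt_empty,
            show ((false, 0, 0, nums, PySem.Set.empty) : PvStA)
              = pvSt g W j (s + 1) (s + 1) nums from (pvSt_empty g W j (s + 1) _).symm,
            ih (s + 1) (s + 1) nums (le_refl _) (by omega) (fun h => by omega) (by omega),
            pvK_diag g W hlen j hj]
lemma pv_outer (g : List (List Char)) (W : Nat) (hg : g ≠ [])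
    (hW : W = (g.headD []).length) (hlen : ∀ r ∈ g, W ≤ r.length) :
    ∀ (n : Nat), n ≤ g.length → ∀ (acc : List (Int × Bool × List (Int × Int))),
      (PySem.List.pyRange 0 (n : Int)).foldl
          (fun st jI => (PySem.List.pyRange 0 (W : Int)).foldl (pvStepA g (W : Int) jI) st)
          (false, 0, 0, acc, PySem.Set.empty)
        = (false, 0, 0, acc ++ (List.range n).flatMap (fun j => pvOut g W j 0),
           PySem.Set.empty) := by
  intro n
  induction n with
  | zero =>
    intro _ acc
    rw [show ((0 : Nat) : Int) = 0 from rfl, PySem.List.pyRange_one_eq_nil (le_refl _)]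
    simp
  | succ n ih =>
    intro hn acc
    rw [show ((n + 1 : Nat) : Int) = (n : Int) + 1 by push_cast; ring,
      PySem.List.pyRange_one_succ_right (by positivity), List.foldl_append, ih (by omega)]
    simp only [List.foldl_cons, List.foldl_nil]
    have hjn : n < g.length := by omega
    have hmain := pv_main g W hg hW hlen n hjn W 0 0
      (acc ++ (List.range n).flatMap (fun j => pvOut g W j 0))
      (le_refl _) (by omega) (by omega) (by omega)
    rw [pvSt_empty] at hmain
    rw [show ((0 : Nat) : Int) = 0 from rfl] at hmain
    rw [hmain, pvK_diag g W hlen n hjn, List.range_succ]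
    simp
theorem extract_nums_spec' : ∀ (lines : List String),
    Pre_extract_nums lines → extract_nums lines = extract_nums_alt lines := by
  intro lines hPre
  obtain ⟨hne, hlenS⟩ := hPre
  match lines, hne with
  | a :: t, _ =>
    set g : List (List Char) := (a :: t).map String.toList with hgdef
    set W : Nat := a.toList.length with hWdef
    have hgne : g ≠ [] := by simp [hgdef]
    have hWg : W = (g.headD []).length := by simp [hgdef, hWdef]
    have hlen : ∀ r ∈ g, W ≤ r.length := by
      intro r hr
      rw [hgdef] at hr
      obtain ⟨s, hs, rfl⟩ := List.mem_map.mp hr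
      have := hlenS s hs
      simpa [hWdef] using this
    have hw : PySem.List.len (PySem.List.pyGetD g 0 []) = (W : Int) := by
      simp [hgdef, hWdef, PySem.List.pyGetD_zero, PySem.List.len_eq]
    have hh : PySem.List.len g = (g.length : Int) := PySem.List.len_eq g
    have hA : extract_nums (a :: t)
        = [] ++ (List.range g.length).flatMap (fun j => pvOut g W j 0) := by
      show (List.foldl
          (fun st j => List.foldl (pvStepA g (PySem.List.len (PySem.List.pyGetD g 0 [])) j) st
            (PySem.List.pyRange 0 (PySem.List.len (PySem.List.pyGetD g 0 []))))
          (false, 0, 0, [], PySem.Set.empty)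
          (PySem.List.pyRange 0 (PySem.List.len g))).2.2.2.1 = _
      rw [hw, hh, pv_outer g W hgne hWg hlen g.length (le_refl _) []]
    have hgrid : (a :: t).map (fun s => s.toList.take W) = pvGrid g W := by
      simp [pvGrid, hgdef, List.map_map]
    have hB : extract_nums_alt (a :: t)
        = (List.range g.length).flatMap (fun j => pvOut g W j 0) := by
      show List.flatMap
          (fun jr => List.map
            (fun se => pvRunTupleB ((a :: t).map (fun s => s.toList.take W)) W
              ((a :: t).map (fun s => s.toList.take W)).length jr.1 jr.2 se.1 se.2)
            (pvRunsB jr.2 0))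
          (PySem.List.enumerate ((a :: t).map (fun s => s.toList.take W))) = _
      rw [hgrid, PySem.List.enumerate_eq_map_pyRange _ ([] : List Char)]
      have hlg : PySem.List.len (pvGrid g W) = (g.length : Int) := by
        simp [PySem.List.len_eq, pvGrid]
      rw [hlg, PySem.List.pyRange_zero_nat, List.flatMap_map, List.flatMap_map]
      refine congrArg (fun f => List.flatMap f (List.range g.length)) (funext fun j => ?_)
      simp only [Function.comp, PySem.List.pyGetD_natCast]
      simp only [pvOut, pvTuple, pvRow, List.drop_zero,
        show (pvGrid g W).length = g.length by simp [pvGrid]]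
    rw [hA, hB]
    simp

-- ===== VERDICT (by name: the statement is the Claim_ definition above) =====
theorem extract_nums_spec : Claim_equal_extract_nums := by
  intro lines _ hPre
  exact extract_nums_spec' lines hPre
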